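-- pv_equiv track=rewrite | github.com/kaushik701/Coding-Interview-Questions | Strings/LongestBalancedSubstring.py | LongestBalanceSubstring
-- ===== SOURCE A (Python) =====
-- def LongestBalanceSubstring(string):
-- 	maxLength = 0
-- 	for i in range(len(string)):
-- 		for j in range(i+2,len(string)+1,2):
-- 			if isBalanced(string[i:j]):
-- 				currentLength = j-i
-- 				maxLength = max(maxLength,currentLength)
--
-- 	return maxLength
--
-- def isBalanced(string):
-- 	openParensStack = []
--
-- 	for char in string:
-- 		if char == "(":
-- 			openParensStack.append("(")
-- 		elif len(openParensStack) > 0: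
-- 			openParensStack.pop()
-- 		else:
-- 			return False
--
-- 	return len(openParensStack) == 0
-- ===== SOURCE B (Python) =====
-- def LongestBalanceSubstring(string):
--     maxLength = 0
--     n = len(string)
--     for i in range(n):
--         bal = 0
--         for j in range(i, n):
--             bal += 1 if string[j] == "(" else -1
--             if bal < 0:
--                 break
--             if bal == 0:
--                 maxLength = max(maxLength, j - i + 1)
--     return maxLength
-- ===== Notes on version B (the rewrite author's own statement) =====
-- stated objective: faster
-- what changed: A slices out every even-length substring and re-checks each with a stack-based isBalanced helper (O(n^3)); B keeps one running balance counter per start index, breaking early when it goes negative and recording the length whenever it returns to zero, removing both the slicing and the per-substring re-scan (O(n^2)).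
import Mathlib
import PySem

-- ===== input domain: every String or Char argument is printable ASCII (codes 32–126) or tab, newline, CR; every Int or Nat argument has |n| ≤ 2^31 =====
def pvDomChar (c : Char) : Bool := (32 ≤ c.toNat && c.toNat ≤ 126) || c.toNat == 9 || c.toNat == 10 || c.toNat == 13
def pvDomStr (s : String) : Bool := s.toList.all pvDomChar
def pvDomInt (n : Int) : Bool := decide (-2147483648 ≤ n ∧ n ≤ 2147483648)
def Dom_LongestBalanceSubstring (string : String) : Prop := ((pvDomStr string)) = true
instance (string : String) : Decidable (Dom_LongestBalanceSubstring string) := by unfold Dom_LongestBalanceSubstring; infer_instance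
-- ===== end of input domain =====

-- B replaces A's slice-and-recheck double loop by a single running balance counter per start
-- index with an early break; objective: faster.

-- ===== PORT A =====
-- A's helper isBalanced: stack of '(', pop on any other char, fail on pop from empty
def pvIsBalanced : List Char → List Char → Bool
  | [], st => st.isEmpty
  | c :: r, st =>
    if c = '(' then pvIsBalanced r ('(' :: st)
    else if st.length > 0 then pvIsBalanced r st.tail
    else false

def LongestBalanceSubstring (string : String) : Int :=
  (PySem.List.pyRange 0 (string.toList.length : Int) 1).foldl (fun maxLength i =>
    (PySem.List.pyRange (i + 2) ((string.toList.length : Int) + 1) 2).foldl (fun acc j =>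
      if pvIsBalanced (PySem.List.slice string.toList (some i) (some j)) [] then max acc (j - i)
      else acc) maxLength) 0

-- ===== PORT B =====
-- inner loop of Source B: running balance from start i, break on negative, record length on zero
def pvScan : List Char → Int → Int → Int → Int
  | [], _, _, maxLength => maxLength
  | c :: r, bal, len, maxLength =>
    let bal' := bal + (if c = '(' then 1 else -1)
    if bal' < 0 then maxLength
    else if bal' = 0 then pvScan r bal' (len + 1) (max maxLength (len + 1))
    else pvScan r bal' (len + 1) maxLength

def LongestBalanceSubstring_alt (string : String) : Int :=
  (PySem.List.pyRange 0 (string.toList.length : Int) 1).foldl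
    (fun maxLength i => pvScan (string.toList.drop i.toNat) 0 0 maxLength) 0

-- ===== PRECONDITION & SPEC =====
def Spec_LongestBalanceSubstring (string : String) (out : Int) : Prop := out = LongestBalanceSubstring_alt string
instance (string : String) (out : Int) : Decidable (Spec_LongestBalanceSubstring string out) := by unfold Spec_LongestBalanceSubstring; infer_instance

-- ===== CLAIM (what is proved, stated in full; the proofs are below) =====
def Claim_equal_LongestBalanceSubstring : Prop := ∀ (string : String), Dom_LongestBalanceSubstring string → Spec_LongestBalanceSubstring string (LongestBalanceSubstring string)

-- ===== LEMMAS AND PROOFS =====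

-- counter form of A's isBalanced: the stack length is all that matters
def pvBalC : List Char → Int → Bool
  | [], b => b == 0
  | c :: r, b =>
    if c = '(' then pvBalC r (b + 1)
    else if b > 0 then pvBalC r (b - 1)
    else false

theorem pvIsBalanced_eq_balC : ∀ (u : List Char) (st : List Char),
    pvIsBalanced u st = pvBalC u (st.length : Int) := by
  intro u
  induction u with
  | nil =>
    intro st
    cases st with
    | nil => simp [pvIsBalanced, pvBalC]
    | cons x rest => simp [pvIsBalanced, pvBalC]; omega
  | cons c r IH =>
    intro st
    by_cases hc : c = '('
    · simp only [pvIsBalanced, pvBalC, hc, if_true]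
      rw [IH]
      simp
    · cases st with
      | nil => simp [pvIsBalanced, pvBalC, hc]
      | cons x rest =>
        simp only [pvIsBalanced, pvBalC, hc, if_false]
        rw [if_pos (by simp : (x :: rest).length > 0),
            if_pos (by simp : ((x :: rest).length : Int) > 0)]
        rw [IH]
        simp

theorem pvBalC_parity : ∀ (u : List Char) (b : Int),
    pvBalC u b = true → ((u.length : Int) + b) % 2 = 0 := by
  intro u
  induction u with
  | nil => intro b h; simp [pvBalC] at h; simp [h]
  | cons c r IH =>
    intro b h
    simp only [pvBalC] at h
    by_cases hc : c = '('
    · rw [if_pos hc] at h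
      have := IH (b + 1) h
      simp only [List.length_cons]
      push_cast
      omega
    · rw [if_neg hc] at h
      by_cases hb : b > 0
      · rw [if_pos hb] at h
        have := IH (b - 1) h
        simp only [List.length_cons]
        push_cast
        omega
      · rw [if_neg hb] at h
        exact absurd h (by simp)

-- pvScan as a fold over the candidate lengths 1..|t|
theorem pvScan_eq_fold : ∀ (t : List Char) (b len acc : Int), 0 ≤ b →
    pvScan t b len acc =
      (List.range t.length).foldl
        (fun a k => if pvBalC (t.take (k + 1)) b then max a (len + ((k : Int) + 1)) else a) acc := by
  intro t
  induction t with
  | nil => intro b len acc _; simp [pvScan]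
  | cons c r IH =>
    intro b len acc hb
    simp only [pvScan]
    by_cases hneg : b + (if c = '(' then 1 else -1) < 0
    · rw [if_pos hneg]
      have hc : ¬ c = '(' := by
        intro h; rw [if_pos h] at hneg; omega
      have hb0 : ¬ (b : Int) > 0 := by
        rw [if_neg hc] at hneg; omega
      have hfalse : ∀ (u : List Char), pvBalC (c :: u) b = false := by
        intro u; simp [pvBalC, hc, hb0]
      rw [List.length_cons, List.range_succ_eq_map, List.foldl_cons, List.foldl_map]
      simp only [Nat.succ_eq_add_one, List.take_succ_cons, hfalse, Bool.false_eq_true,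
        if_false]
      exact (List.foldl_fixed _).symm
    · rw [if_neg hneg]
      rw [Int.not_lt] at hneg
      have hstep : ∀ u : List Char, pvBalC (c :: u) b = pvBalC u (b + (if c = '(' then 1 else -1)) := by
        intro u
        by_cases hc : c = '('
        · simp [pvBalC, hc]
        · have hbp : (b : Int) > 0 := by rw [if_neg hc] at hneg; omega
          rw [if_neg hc]
          simp only [pvBalC, if_neg hc, if_pos hbp]
          rw [show b + (-1 : Int) = b - 1 from by ring]
      rw [List.length_cons, List.range_succ_eq_map, List.foldl_cons, List.foldl_map]
      simp only [Nat.succ_eq_add_one, List.take_succ_cons, List.take_zero, Nat.cast_zero,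
        Nat.cast_add, Nat.cast_one]
      have h1 : pvBalC (c :: List.nil) b = (b + (if c = '(' then 1 else -1) == 0) := by
        rw [hstep]; simp [pvBalC]
      by_cases hz : b + (if c = '(' then 1 else -1) = 0
      · rw [if_pos hz, IH _ _ _ (le_of_eq hz.symm)]
        have hinit : (if pvBalC [c] b = true then max acc (len + (0 + 1)) else acc)
            = max acc (len + 1) := by
          simp only [h1, hz]
          simp
        rw [hinit]
        apply PySem.List.foldl_congr_mem
        intro a k _
        rw [hstep, hz]
        have hv : len + ((k : Int) + 1 + 1) = len + 1 + ((k : Int) + 1) := by ring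
        rw [hv]
      · rw [if_neg hz, IH _ _ _ (by omega)]
        have hinit : (if pvBalC [c] b = true then max acc (len + (0 + 1)) else acc)
            = acc := by
          simp only [h1]
          simp [hz]
        rw [hinit]
        apply PySem.List.foldl_congr_mem
        intro a k _
        rw [hstep]
        have hv : len + ((k : Int) + 1 + 1) = len + 1 + ((k : Int) + 1) := by ring
        rw [hv]

-- even candidate lengths 1..m are exactly 2,4,...
theorem pvEvens_eq : ∀ m : Nat,
    ((List.range m).map (fun k => k + 1)).filter (fun L => decide (L % 2 = 0)) =
      (List.range (m / 2)).map (fun k => 2 * k + 2) := by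
  intro m
  induction m with
  | zero => simp
  | succ m IH =>
    rw [List.range_succ, List.map_append, List.filter_append, IH]
    by_cases h : (m + 1) % 2 = 0
    · have h2 : (m + 1) / 2 = m / 2 + 1 := by omega
      have h3 : 2 * (m / 2) + 2 = m + 1 := by omega
      rw [h2, List.range_succ, List.map_append]
      simp [h, h3]
    · have h2 : (m + 1) / 2 = m / 2 := by omega
      simp [h, h2]

theorem pv_per_i (s : List Char) (i : Int) (h0 : 0 ≤ i) (hlt : i < (s.length : Int)) (acc : Int) :
    (PySem.List.pyRange (i + 2) ((s.length : Int) + 1) 2).foldl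
      (fun a j => if pvIsBalanced (PySem.List.slice s (some i) (some j)) [] then max a (j - i) else a) acc
    = pvScan (s.drop i.toNat) 0 0 acc := by
  obtain ⟨iN, rfl⟩ : ∃ iN : Nat, i = (iN : Int) := ⟨i.toNat, (Int.toNat_of_nonneg h0).symm⟩
  rw [Int.toNat_natCast]
  have hm : (s.drop iN).length = s.length - iN := List.length_drop
  rw [PySem.List.pyRange_of_pos _ _ (by norm_num : (0:Int) < 2)]
  have hK : (if (iN : Int) + 2 < (s.length : Int) + 1
        then (((s.length : Int) + 1 - ((iN : Int) + 2) + 2 - 1) / 2).toNat else 0)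
      = (s.drop iN).length / 2 := by
    rw [hm]; split_ifs with h <;> omega
  rw [hK, List.foldl_map]
  refine Eq.trans (PySem.List.foldl_congr_mem _ _
      (fun a k => if pvBalC ((s.drop iN).take (2 * k + 2)) 0 then max a ((2 * k + 2 : Nat) : Int) else a)
      acc ?_) ?_
  · intro a k _
    have hcast : (iN : Int) + 2 + 2 * (k : Int) = ((iN + (2 * k + 2) : Nat) : Int) := by
      push_cast; ring
    rw [hcast, PySem.List.slice_natCast, show iN + (2 * k + 2) - iN = 2 * k + 2 from by omega]
    rw [pvIsBalanced_eq_balC]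
    simp only [List.length_nil, Nat.cast_zero]
    rw [show ((iN + (2 * k + 2) : Nat) : Int) - (iN : Int) = ((2 * k + 2 : Nat) : Int) from by
      push_cast; ring]
  · rw [← List.foldl_map (f := fun k => 2 * k + 2)
        (g := fun (a : Int) (L : Nat) => if pvBalC ((s.drop iN).take L) 0 then max a (L : Int) else a)]
    rw [← pvEvens_eq, List.foldl_filter, List.foldl_map]
    rw [pvScan_eq_fold _ 0 0 acc le_rfl]
    apply PySem.List.foldl_congr_mem
    intro a k hk
    have hkm : k < (s.drop iN).length := List.mem_range.mp hk
    by_cases he : (k + 1) % 2 = 0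
    · simp only [he, decide_true, if_true]
      rw [show ((k + 1 : Nat) : Int) = 0 + ((k : Int) + 1) from by push_cast; ring]
    · have hfalse : pvBalC ((s.drop iN).take (k + 1)) 0 = false := by
        cases h : pvBalC ((s.drop iN).take (k + 1)) 0 with
        | false => rfl
        | true =>
          have hp := pvBalC_parity _ _ h
          rw [List.length_take, min_eq_left (by omega)] at hp
          omega
      simp [he, hfalse]

-- ===== VERDICT (by name: the statement is the Claim_ definition above) =====
theorem LongestBalanceSubstring_spec : Claim_equal_LongestBalanceSubstring := by
  intro string _
  unfold Spec_LongestBalanceSubstring LongestBalanceSubstring LongestBalanceSubstring_alt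
  apply PySem.List.foldl_congr_mem
  intro acc i hi
  obtain ⟨h0, hlt⟩ := PySem.List.mem_pyRange_one.mp hi
  exact pv_per_i string.toList i h0 hlt acc
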